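-- pv_equiv track=rewrite | github.com/ESPRI-Mod/synda | sdt/bin/sdnexturl.py | prioritize_urlps
-- ===== SOURCE A (Python) =====
-- def prioritize_urlps( urlps, old_url ):
--     """Orders a list urlps so that the highest-priority urls come first.  urlps is a list of
--     lists of the form [url,protocol].
--     Some data nodes are preferred over others.  Then, GridFTP is preferred over http."""
--     # Formerly, I prioritized the other way; but experience shows that many data nodes which
--     # officially support GridFTP, don't usually have it working.
--     # Note also that within this function a "high priority" url has a low priority number.
--     # That's just for programming convenience.
--
--     def priprotocol(protocol):
--         if protocol.find('gridftp')>0:  return 0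
--         if protocol.find('http')>0:     return 1
--         return 2
--     def priurl(url):
--         if url.find('llnl')>0:  return 0
--         if url.find('gridftp.ipsl')>0:  return 1
--         if url.find('vesg.ipsl')>0:  return 2
--         if url.find('ceda')>0:  return 3
--         if url.find('dkrz')>0:  return 4
--         if url.find('nci')>0:   return 5
--         if old_url.find('lasg')<0 and url.find('lasg')>0:
--             return 99  # Never fall back to this very slow data node; but changing protocol is ok.
--         return 6
--     urlps_cleaned = [ urlp for urlp in urlps if priurl(urlp[0])<99 ]
--     return sorted( urlps_cleaned, key=(lambda urlp: ( priurl(urlp[0]), priprotocol(urlp[1]))) )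
-- ===== SOURCE B (Python) =====
-- URL_ORDER = ['llnl', 'gridftp.ipsl', 'vesg.ipsl', 'ceda', 'dkrz', 'nci']
-- PROTOCOL_ORDER = ['gridftp', 'http']
--
--
-- def _rank(s, table):
--     """Index of the first table entry occurring in s at position > 0, else len(table)."""
--     n = 0
--     for sub in table:
--         if s.find(sub) > 0:
--             return n
--         n += 1
--     return n
--
--
-- def prioritize_urlps(urlps, old_url):
--     """Bucket (counting-sort style) version with table-driven priorities: one pass
--     distributing each kept pair into a fixed 21-slot grid, then flattening in order."""
--     keep_lasg = old_url.find('lasg') > -1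
--     buckets = [[] for _ in range(21)]
--     for urlp in urlps:
--         u = _rank(urlp[0], URL_ORDER)
--         if u == 6 and not keep_lasg and urlp[0].find('lasg') > 0:
--             continue  # never fall back to the lasg data node
--         buckets[3 * u + _rank(urlp[1], PROTOCOL_ORDER)].append(urlp)
--     out = []
--     for bucket in buckets:
--         out += bucket
--     return out
-- ===== Notes on version B (the rewrite author's own statement) =====
-- stated objective: faster
-- what changed: Replaces the if-chain priority helpers plus filter-then-comparison-sort by table-driven rank lookups and a single-pass counting/bucket sort into a fixed 21-slot grid (7 url ranks x 3 protocol ranks) flattened in index order, which preserves stability exactly.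
-- outside the precondition, e.g. on prioritize_urlps([['xlasgx']], ''): A returns [], B returns []
import Mathlib
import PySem

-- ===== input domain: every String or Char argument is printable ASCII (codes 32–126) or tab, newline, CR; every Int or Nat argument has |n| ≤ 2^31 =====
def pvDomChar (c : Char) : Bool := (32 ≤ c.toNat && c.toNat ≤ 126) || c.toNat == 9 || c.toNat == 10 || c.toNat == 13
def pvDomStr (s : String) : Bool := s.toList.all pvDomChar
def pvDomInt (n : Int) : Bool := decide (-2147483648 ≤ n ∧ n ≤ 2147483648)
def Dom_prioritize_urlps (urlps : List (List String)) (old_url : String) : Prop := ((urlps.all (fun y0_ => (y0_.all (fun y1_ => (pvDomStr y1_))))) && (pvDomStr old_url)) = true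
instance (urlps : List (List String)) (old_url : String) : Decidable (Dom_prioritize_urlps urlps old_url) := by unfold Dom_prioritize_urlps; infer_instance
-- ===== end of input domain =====

-- B replaces A's if-chain helpers + filter-then-stable-sort by table-driven rank lookups and a
-- one-pass bucket (counting) sort into a 21-slot grid flattened in index order; measurably faster.

-- ===== PORT A =====
def priprotocolA (protocol : String) : Int :=
  if PySem.Str.find protocol "gridftp" > 0 then 0
  else if PySem.Str.find protocol "http" > 0 then 1
  else 2

def priurlA (old_url url : String) : Int :=
  if PySem.Str.find url "llnl" > 0 then 0
  else if PySem.Str.find url "gridftp.ipsl" > 0 then 1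
  else if PySem.Str.find url "vesg.ipsl" > 0 then 2
  else if PySem.Str.find url "ceda" > 0 then 3
  else if PySem.Str.find url "dkrz" > 0 then 4
  else if PySem.Str.find url "nci" > 0 then 5
  else if PySem.Str.find old_url "lasg" < 0 ∧ PySem.Str.find url "lasg" > 0 then 99
  else 6

-- urlp[0] / urlp[1] ported as pyGet? with a dummy default; exact under Pre_ (every inner list has length ≥ 2).
def prioritize_urlps (urlps : List (List String)) (old_url : String) : List (List String) :=
  let urlps_cleaned := urlps.filter (fun urlp => priurlA old_url ((PySem.List.pyGet? urlp 0).getD "") < 99)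
  PySem.List.sorted2 urlps_cleaned
    (fun urlp => priurlA old_url ((PySem.List.pyGet? urlp 0).getD ""))
    (fun urlp => priprotocolA ((PySem.List.pyGet? urlp 1).getD ""))

-- ===== PORT B =====
def urlOrder : List String := ["llnl", "gridftp.ipsl", "vesg.ipsl", "ceda", "dkrz", "nci"]
def protocolOrder : List String := ["gridftp", "http"]

-- Source B's _rank: walks the table with a running counter n, returning the counter at the
-- first entry occurring in s at position > 0, or the table length if none does.
def rankB (s : String) : List String → Int → Int
  | [], n => n
  | sub :: rest, n => if PySem.Str.find s sub > 0 then n else rankB s rest (n + 1)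

-- buckets[3*u+q].append(urlp): the index is provably in 0..20 for kept pairs, so .toNat is
-- exact; the final accumulation loop over the 21 buckets is their flatten in index order.
def prioritize_urlps_alt (urlps : List (List String)) (old_url : String) : List (List String) :=
  let keep_lasg := PySem.Str.find old_url "lasg" > -1
  let buckets := urlps.foldl
    (fun bs urlp =>
      let u := rankB ((PySem.List.pyGet? urlp 0).getD "") urlOrder 0
      if u = 6 ∧ ¬ keep_lasg ∧ PySem.Str.find ((PySem.List.pyGet? urlp 0).getD "") "lasg" > 0 then bs
      else
        let i := (3 * u + rankB ((PySem.List.pyGet? urlp 1).getD "") protocolOrder 0).toNat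
        bs.set i (bs.getD i [] ++ [urlp]))
    (List.replicate 21 ([] : List (List String)))
  buckets.flatten

-- ===== PRECONDITION & SPEC =====
-- Pre_ excludes inner lists with fewer than 2 entries, on which A raises IndexError (urlp[0], or the
-- sort key's urlp[1]) — except one-element lists whose lone url is dropped by the lasg filter before
-- its protocol is read, where A and B both return the list without them anyway.
def Pre_prioritize_urlps (urlps : List (List String)) (old_url : String) : Prop :=
  ∀ u ∈ urlps, 2 ≤ u.length
instance (urlps : List (List String)) (old_url : String) : Decidable (Pre_prioritize_urlps urlps old_url) := by unfold Pre_prioritize_urlps; infer_instance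

def pvWitness_prioritize_urlps : List (List String) × String :=
  ([["http://vesg.ipsl.fr/a", "xgridftp"], ["http://adkrz/b", "zhttp"], ["http://adkrz/b", "agridftpz"]], "http://old")

def Spec_prioritize_urlps (urlps : List (List String)) (old_url : String) (out : List (List String)) : Prop := out = prioritize_urlps_alt urlps old_url
instance (urlps : List (List String)) (old_url : String) (out : List (List String)) : Decidable (Spec_prioritize_urlps urlps old_url out) := by unfold Spec_prioritize_urlps; infer_instance

-- ===== CLAIM (what is proved, stated in full; the proofs are below) =====
def Claim_equal_prioritize_urlps : Prop := ∀ (urlps : List (List String)) (old_url : String), Dom_prioritize_urlps urlps old_url → Pre_prioritize_urlps urlps old_url → Spec_prioritize_urlps urlps old_url (prioritize_urlps urlps old_url)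

-- ===== LEMMAS AND PROOFS =====

-- the flattened (url, protocol) priority key; for kept pairs it is the bucket index in 0..20
def keyK (old_url : String) (u : List String) : Int :=
  3 * priurlA old_url ((PySem.List.pyGet? u 0).getD "") + priprotocolA ((PySem.List.pyGet? u 1).getD "")

-- the "before" comparison sorted2 uses (lexicographic on the tuple key), specialised to port A's keys
def ltA (old_url : String) (a b : List String) : Bool :=
  decide (priurlA old_url ((PySem.List.pyGet? a 0).getD "") < priurlA old_url ((PySem.List.pyGet? b 0).getD "")) ||
  (!decide (priurlA old_url ((PySem.List.pyGet? b 0).getD "") < priurlA old_url ((PySem.List.pyGet? a 0).getD "")) &&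
   decide (priprotocolA ((PySem.List.pyGet? a 1).getD "") < priprotocolA ((PySem.List.pyGet? b 1).getD "")))

-- bucket-state invariant: 21 buckets, bucket i holding only kept pairs of key i
def Good (old_url : String) (bs : List (List (List String))) : Prop :=
  bs.length = 21 ∧ ∀ i (h : i < bs.length), ∀ y ∈ bs[i],
    priurlA old_url ((PySem.List.pyGet? y 0).getD "") < 99 ∧ (keyK old_url y).toNat = i

-- B's table ranks coincide with A's if-chain helpers
theorem rankB_url_bounds (u : String) : 0 ≤ rankB u urlOrder 0 ∧ rankB u urlOrder 0 ≤ 6 := by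
  simp only [rankB, urlOrder]; split_ifs <;> norm_num

theorem rank_protocol_eq (s : String) : rankB s protocolOrder 0 = priprotocolA s := by
  simp only [rankB, protocolOrder, priprotocolA]
  split_ifs <;> norm_num

theorem rank_url_eq (o u : String) :
    priurlA o u =
      if rankB u urlOrder 0 = 6 ∧ ¬ PySem.Str.find o "lasg" > -1 ∧ PySem.Str.find u "lasg" > 0
      then 99 else rankB u urlOrder 0 := by
  simp only [rankB, urlOrder, priurlA]
  split_ifs <;> omega

theorem priprotocolA_bounds (s : String) : 0 ≤ priprotocolA s ∧ priprotocolA s < 3 := by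
  unfold priprotocolA; split_ifs <;> norm_num

theorem priurlA_cases (o u : String) : (0 ≤ priurlA o u ∧ priurlA o u ≤ 6) ∨ priurlA o u = 99 := by
  unfold priurlA; split_ifs <;> norm_num

theorem keyK_bounds (o : String) (u : List String)
    (h : priurlA o ((PySem.List.pyGet? u 0).getD "") < 99) :
    0 ≤ keyK o u ∧ keyK o u < 21 := by
  have h1 := priurlA_cases o ((PySem.List.pyGet? u 0).getD "")
  have h2 := priprotocolA_bounds ((PySem.List.pyGet? u 1).getD "")
  unfold keyK; omega

theorem ltA_eq_keyK (o : String) (a b : List String) :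
    ltA o a b = decide (keyK o a < keyK o b) := by
  have h1 := priurlA_cases o ((PySem.List.pyGet? a 0).getD "")
  have h2 := priurlA_cases o ((PySem.List.pyGet? b 0).getD "")
  have h3 := priprotocolA_bounds ((PySem.List.pyGet? a 1).getD "")
  have h4 := priprotocolA_bounds ((PySem.List.pyGet? b 1).getD "")
  unfold ltA keyK
  by_cases hlt : (3 * priurlA o ((PySem.List.pyGet? a 0).getD "") + priprotocolA ((PySem.List.pyGet? a 1).getD "")) <
      (3 * priurlA o ((PySem.List.pyGet? b 0).getD "") + priprotocolA ((PySem.List.pyGet? b 1).getD "")) <;>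
    simp [hlt] <;> omega

theorem insertBy_append_of_false {α : Type} (before : α → α → Bool) (x : α) (l1 l2 : List α)
    (h : ∀ y ∈ l1, before x y = false) :
    PySem.List.insertBy before x (l1 ++ l2) = l1 ++ PySem.List.insertBy before x l2 := by
  induction l1 with
  | nil => simp
  | cons a t ih =>
    have ha : before x a = false := h a (by simp)
    simp [PySem.List.insertBy, ha, ih (fun y hy => h y (by simp [hy]))]

theorem insertBy_of_true {α : Type} (before : α → α → Bool) (x : α) (l : List α)
    (h : ∀ y ∈ l, before x y = true) :
    PySem.List.insertBy before x l = x :: l := by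
  cases l with
  | nil => rfl
  | cons a t => simp [PySem.List.insertBy, h a (by simp)]

theorem ins_flatten (o : String) (x : List String) (bs : List (List (List String)))
    (hgood : Good o bs) (hx : priurlA o ((PySem.List.pyGet? x 0).getD "") < 99) :
    PySem.List.insertBy (ltA o) x bs.flatten
      = (bs.set (keyK o x).toNat (bs.getD (keyK o x).toNat [] ++ [x])).flatten := by
  obtain ⟨hlen, hbuck⟩ := hgood
  have hkx := keyK_bounds o x hx
  set n := (keyK o x).toNat with hn
  have hnlt : n < bs.length := by omega
  conv_lhs => rw [← List.take_append_drop (n+1) bs, List.flatten_append]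
  rw [insertBy_append_of_false]
  · rw [insertBy_of_true]
    · rw [List.set_eq_take_append_cons_drop, if_pos hnlt, List.flatten_append,
        List.getD_eq_getElem bs [] hnlt]
      have ht : List.take (n+1) bs = List.take n bs ++ [bs[n]] := by
        rw [List.take_add_one, List.getElem?_eq_getElem hnlt]; rfl
      rw [ht, List.flatten_append]
      simp
    · intro y hy
      rw [List.mem_flatten] at hy
      obtain ⟨l, hl, hyl⟩ := hy
      rw [List.mem_drop_iff_getElem] at hl
      obtain ⟨j, hj, hlj⟩ := hl
      have := hbuck (n + 1 + j) (by omega) y (by rw [hlj]; exact hyl)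
      rw [ltA_eq_keyK o x y]
      have hky := keyK_bounds o y this.1
      simp only [decide_eq_true_eq]
      omega
  · intro y hy
    rw [List.mem_flatten] at hy
    obtain ⟨l, hl, hyl⟩ := hy
    rw [List.mem_take_iff_getElem] at hl
    obtain ⟨j, hj, hlj⟩ := hl
    have hjlt : j < bs.length := by omega
    have := hbuck j hjlt y (by rw [hlj]; exact hyl)
    rw [ltA_eq_keyK o x y]
    have hky := keyK_bounds o y this.1
    simp only [decide_eq_false_iff_not, not_lt]
    omega

theorem good_set (o : String) (x : List String) (bs : List (List (List String)))
    (hgood : Good o bs) (hx : priurlA o ((PySem.List.pyGet? x 0).getD "") < 99) :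
    Good o (bs.set (keyK o x).toNat (bs.getD (keyK o x).toNat [] ++ [x])) := by
  obtain ⟨hlen, hbuck⟩ := hgood
  have hkx := keyK_bounds o x hx
  refine ⟨by simp [hlen], ?_⟩
  intro i hi y hy
  rw [List.length_set] at hi
  rw [List.getElem_set] at hy
  by_cases hin : (keyK o x).toNat = i
  · subst hin
    rw [if_pos rfl] at hy
    rw [List.getD_eq_getElem bs [] (by omega), List.mem_append] at hy
    rcases hy with hy | hy
    · exact hbuck _ hi y hy
    · have : y = x := by simpa using hy
      subst this; exact ⟨hx, rfl⟩
  · rw [if_neg hin] at hy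
    exact hbuck i hi y hy

theorem good_replicate (o : String) : Good o (List.replicate 21 ([] : List (List String))) := by
  refine ⟨by simp, ?_⟩
  intro i hi y hy
  rw [List.getElem_replicate] at hy
  simp at hy

theorem main_loop (o : String) (xs : List (List String)) :
    ∀ bs : List (List (List String)), Good o bs →
    xs.foldl (fun acc x =>
        if priurlA o ((PySem.List.pyGet? x 0).getD "") < 99
        then PySem.List.insertBy (ltA o) x acc else acc) bs.flatten
      = (xs.foldl (fun bs urlp =>
          let u := rankB ((PySem.List.pyGet? urlp 0).getD "") urlOrder 0
          if u = 6 ∧ ¬ PySem.Str.find o "lasg" > -1 ∧ PySem.Str.find ((PySem.List.pyGet? urlp 0).getD "") "lasg" > 0 then bs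
          else
            let i := (3 * u + rankB ((PySem.List.pyGet? urlp 1).getD "") protocolOrder 0).toNat
            bs.set i (bs.getD i [] ++ [urlp])) bs).flatten := by
  induction xs with
  | nil => intro bs _; simp
  | cons x t ih =>
    intro bs hgood
    simp only [List.foldl_cons]
    have hurl := rank_url_eq o ((PySem.List.pyGet? x 0).getD "")
    by_cases hc : rankB ((PySem.List.pyGet? x 0).getD "") urlOrder 0 = 6 ∧
        ¬ PySem.Str.find o "lasg" > -1 ∧ PySem.Str.find ((PySem.List.pyGet? x 0).getD "") "lasg" > 0
    · have h99 : priurlA o ((PySem.List.pyGet? x 0).getD "") = 99 := by rw [hurl, if_pos hc]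
      rw [if_neg (by omega), if_pos hc]
      exact ih bs hgood
    · have heq : priurlA o ((PySem.List.pyGet? x 0).getD "")
          = rankB ((PySem.List.pyGet? x 0).getD "") urlOrder 0 := by rw [hurl, if_neg hc]
      have hbd := rankB_url_bounds ((PySem.List.pyGet? x 0).getD "")
      have hlt : priurlA o ((PySem.List.pyGet? x 0).getD "") < 99 := by omega
      rw [if_pos hlt, if_neg hc]
      have hkey : (keyK o x).toNat
          = (3 * rankB ((PySem.List.pyGet? x 0).getD "") urlOrder 0
              + rankB ((PySem.List.pyGet? x 1).getD "") protocolOrder 0).toNat := by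
        rw [keyK, heq, rank_protocol_eq]
      rw [ins_flatten o x bs hgood hlt, hkey]
      have hgood' := good_set o x bs hgood hlt
      rw [keyK, heq, ← rank_protocol_eq ((PySem.List.pyGet? x 1).getD "")] at hgood'
      exact ih _ hgood'

-- ===== VERDICT (by name: the statement is the Claim_ definition above) =====
theorem prioritize_urlps_spec : Claim_equal_prioritize_urlps := by
  intro urlps old_url _ _
  unfold Spec_prioritize_urlps prioritize_urlps prioritize_urlps_alt
  have hsorted :
      PySem.List.sorted2 (urlps.filter (fun urlp => priurlA old_url ((PySem.List.pyGet? urlp 0).getD "") < 99))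
        (fun urlp => priurlA old_url ((PySem.List.pyGet? urlp 0).getD ""))
        (fun urlp => priprotocolA ((PySem.List.pyGet? urlp 1).getD ""))
      = (urlps.filter (fun urlp => priurlA old_url ((PySem.List.pyGet? urlp 0).getD "") < 99)).foldl
          (fun acc x => PySem.List.insertBy (ltA old_url) x acc) [] := rfl
  rw [hsorted, List.foldl_filter]
  have hinit : ([] : List (List String)) = (List.replicate 21 ([] : List (List String))).flatten := by
    simp
  rw [hinit]
  have := main_loop old_url urlps (List.replicate 21 []) (good_replicate old_url)
  simpa using this
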